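-- pv_equiv track=rewrite | github.com/FatoumattaConteh/Cellular-Automata-Generated-Sbox-Compression-Decompression | SboxCriteriaTesting/CombinedCustomizedSboxTestForAllTests.py | compress_bits
-- ===== SOURCE A (Python) =====
-- from typing import Dict, List, Tuple, Any
--
-- def build_reverse_sbox(sbox: Dict[str, List[int]]) -> Dict[int, Tuple[str,int]]:
--     rev = {}
--     for rule, vals in sbox.items():
--         for idx, v in enumerate(vals):
--             rev[v] = (rule, idx)
--     return rev
--
-- def compress_bits(bits: str, sbox: Dict[str, List[int]]) -> Tuple[str, List[str]]:
--     rev = build_reverse_sbox(sbox)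
--     out_bits = []
--     rules = []
--     for i in range(0, len(bits), 6):
--         chunk = bits[i:i+6]
--         if len(chunk) < 6:
--             continue
--         val = int(chunk, 2)
--         if val not in rev:
--             raise ValueError(f"Value {val} not found in S-box")
--         rule, idx = rev[val]
--         out_bits.append(format(idx, '04b'))
--         rules.append(rule)
--     return ''.join(out_bits), rules
-- ===== SOURCE B (Python) =====
-- from typing import Dict, List, Tuple
--
-- def compress_bits(bits: str, sbox: Dict[str, List[int]]) -> Tuple[str, List[str]]:
--     def lookup(val: int) -> Tuple[str, int]:
--         for rule, vals in sbox.items():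
--             if val in vals:
--                 return rule, vals.index(val)
--         raise ValueError(f"Value {val} not found in S-box")
--
--     out_bits = []
--     rules = []
--     rest = bits
--     while len(rest) >= 6:
--         chunk, rest = rest[:6], rest[6:]
--         rule, idx = lookup(int(chunk, 2))
--         out_bits.append(format(idx, '04b'))
--         rules.append(rule)
--     return ''.join(out_bits), rules
-- ===== Notes on version B (the rewrite author's own statement) =====
-- stated objective: simpler
-- what changed: B drops the precomputed reverse dict and consumes the bit string with a while loop (slice off 6 chars at a time, no index arithmetic), resolving each chunk with a first-match lookup helper; Pre_ excludes inputs whose chunk values occur more than once across the S-box, where A's dict last-write-wins pick is accidental, and inputs where A raises (short of that, a chunk value missing from the S-box or a non-binary chunk).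
-- outside the precondition, e.g. on compress_bits('000010', {'r1': [2], 'r2': [2]}): A returns ('0000', ['r2']), B returns ('0000', ['r1'])
import Mathlib
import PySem

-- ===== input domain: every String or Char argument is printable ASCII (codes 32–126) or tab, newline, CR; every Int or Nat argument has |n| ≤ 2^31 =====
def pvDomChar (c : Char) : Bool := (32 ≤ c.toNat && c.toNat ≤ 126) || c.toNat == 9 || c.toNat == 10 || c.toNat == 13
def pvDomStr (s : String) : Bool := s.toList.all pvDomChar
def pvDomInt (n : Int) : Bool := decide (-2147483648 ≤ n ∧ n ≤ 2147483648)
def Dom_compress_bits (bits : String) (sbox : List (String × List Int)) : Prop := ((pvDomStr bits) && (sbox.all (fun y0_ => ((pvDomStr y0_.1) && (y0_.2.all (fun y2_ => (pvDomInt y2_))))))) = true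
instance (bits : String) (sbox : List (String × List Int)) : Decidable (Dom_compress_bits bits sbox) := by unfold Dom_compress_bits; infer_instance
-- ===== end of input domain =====

-- B replaces the precomputed reverse dict with a while loop slicing 6 chars at a time and a
-- first-match lookup helper; equivalence is proved on Pre_, which excludes duplicate-valued S-boxes
-- (where the dict's last-write-wins pick is accidental) and the inputs on which A raises.

-- ===== PORT A =====

-- format(n, '04b') for n ≥ 0 (only list indices reach it): binary digits left-padded with '0' to width 4.
def pyFormat04b (n : Int) : String :=
  PySem.Str.zfill (String.ofList (Nat.toDigits 2 n.toNat)) 4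

def build_reverse_sbox (sbox : List (String × List Int)) : PySem.Dict Int (String × Int) :=
  sbox.foldl
    (fun rev rv =>
      (PySem.List.enumerate rv.2).foldl (fun rev p => rev.insert p.2 (rv.1, p.1)) rev)
    PySem.Dict.empty

-- the loop state is 'some (out_bits, rules)'; 'none' marks a raised ValueError (excluded by Pre_)
def compress_bits (bits : String) (sbox : List (String × List Int)) : String × List String :=
  let rev := build_reverse_sbox sbox
  let st :=
    (PySem.List.pyRange 0 (PySem.Str.len bits) 6).foldl
      (fun st i =>
        match st with
        | none => none
        | some (ob, rs) =>
          let chunk := PySem.Str.slice bits (some i) (some (i + 6))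
          if PySem.Str.len chunk < 6 then some (ob, rs)
          else
            match PySem.Int.ofStrBase? chunk 2 with
            | none => none
            | some val =>
              match rev.get? val with
              | none => none
              | some ri => some (ob ++ [pyFormat04b ri.2], rs ++ [ri.1]))
      (some ([], []))
  match st with
  | some (ob, rs) => (PySem.Str.join "" ob, rs)
  | none => ("", [])

-- ===== PORT B =====

-- the 'for rule, vals … if val in vals: return rule, vals.index(val)' helper; none = the raise
def lookup_alt (sbox : List (String × List Int)) (val : Int) : Option (String × Int) :=
  (sbox.find? (fun rv => rv.2.contains val)).bind
    (fun rv => (PySem.List.index? rv.2 val).map (fun i => (rv.1, (i : Int))))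

-- the while loop on rest (strings handled as their char lists; rest[:6]/rest[6:] are take/drop 6)
def compress_go (sbox : List (String × List Int)) (rest : List Char)
    (ob rs : List String) : Option (List String × List String) :=
  if _h : 6 ≤ rest.length then
    match PySem.Int.ofCharsBase? (rest.take 6) 2 with
    | none => none
    | some val =>
      match lookup_alt sbox val with
      | none => none
      | some ri => compress_go sbox (rest.drop 6) (ob ++ [pyFormat04b ri.2]) (rs ++ [ri.1])
  else some (ob, rs)
termination_by rest.length
decreasing_by simp; omega

def compress_bits_alt (bits : String) (sbox : List (String × List Int)) : String × List String :=
  match compress_go sbox bits.toList [] [] with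
  | some (ob, rs) => (PySem.Str.join "" ob, rs)
  | none => ("", [])

-- ===== PRECONDITION & SPEC =====

-- Pre_ excludes the inputs on which A raises ValueError (a full 6-char chunk that is not a binary
-- literal, or whose value is in no S-box entry) and those where a chunk's value occurs more than
-- once across the S-box values, where A's reverse-dict pick (last write wins) is accidental.
def Pre_compress_bits (bits : String) (sbox : List (String × List Int)) : Prop :=
  ∀ i ∈ PySem.List.pyRange 0 (PySem.Str.len bits) 6,
    let chunk := PySem.Str.slice bits (some i) (some (i + 6))
    ¬ PySem.Str.len chunk < 6 →
      ((PySem.Int.ofStrBase? chunk 2).any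
        (fun v => (sbox.flatMap Prod.snd).count v == 1)) = true
instance (bits : String) (sbox : List (String × List Int)) : Decidable (Pre_compress_bits bits sbox) := by unfold Pre_compress_bits; infer_instance

def pvWitness_compress_bits : String × (List (String × List Int)) :=
  ("000010000011", [("rule90", [2, 3]), ("rule30", [9])])

def Spec_compress_bits (bits : String) (sbox : List (String × List Int)) (out : String × List String) : Prop := out = compress_bits_alt bits sbox
instance (bits : String) (sbox : List (String × List Int)) (out : String × List String) : Decidable (Spec_compress_bits bits sbox out) := by unfold Spec_compress_bits; infer_instance

-- ===== CLAIM (what is proved, stated in full; the proofs are below) =====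
def Claim_equal_compress_bits : Prop := ∀ (bits : String) (sbox : List (String × List Int)), Dom_compress_bits bits sbox → Pre_compress_bits bits sbox → Spec_compress_bits bits sbox (compress_bits bits sbox)

-- ===== LEMMAS AND PROOFS =====

-- A's reverse-dict lookup, characterised: the last-match scan over the S-box entries.
def lastScan (sbox : List (String × List Int)) (v : Int) : Option (String × Int) :=
  sbox.foldl
    (fun m rv =>
      (PySem.List.enumerate rv.2).foldl
        (fun m p => if p.2 == v then some (rv.1, p.1) else m) m)
    none

-- Looking up v in a dict built by inserting (p.2 ↦ (rule, p.1)) for each enumerated pair equals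
-- the last-match scan of the same pairs (insert overwrites, so the last write wins on both sides).
theorem get?_foldl_insert_enumerate (l : List (Int × Int)) (rule : String)
    (d : PySem.Dict Int (String × Int)) (v : Int) :
    (l.foldl (fun d p => d.insert p.2 (rule, p.1)) d).get? v
      = l.foldl (fun m p => if p.2 == v then some (rule, p.1) else m) (d.get? v) := by
  induction l generalizing d with
  | nil => rfl
  | cons p t ih =>
    simp only [List.foldl_cons, ih]
    congr 1
    rw [PySem.Dict.get?_insert]
    by_cases h : p.2 = v
    · simp [h]
    · simp [h, Ne.symm h]

theorem get?_build_aux (sbox : List (String × List Int))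
    (d : PySem.Dict Int (String × Int)) (v : Int) :
    (sbox.foldl
        (fun rev rv =>
          (PySem.List.enumerate rv.2).foldl (fun rev p => rev.insert p.2 (rv.1, p.1)) rev)
        d).get? v
      = sbox.foldl
          (fun m rv =>
            (PySem.List.enumerate rv.2).foldl
              (fun m p => if p.2 == v then some (rv.1, p.1) else m) m)
          (d.get? v) := by
  induction sbox generalizing d with
  | nil => rfl
  | cons rv t ih =>
    simp only [List.foldl_cons, ih, get?_foldl_insert_enumerate]

theorem get?_build_reverse (sbox : List (String × List Int)) (v : Int) :
    (build_reverse_sbox sbox).get? v = lastScan sbox v := by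
  unfold build_reverse_sbox lastScan
  rw [get?_build_aux]
  rfl

-- inner scan over a list not containing v never fires
theorem inner_noop (l : List Int) (v : Int) (r : String) (hv : v ∉ l) :
    ∀ (s : Int) (m : Option (String × Int)),
      (PySem.List.enumerate l s).foldl
        (fun m p => if p.2 == v then some (r, p.1) else m) m = m := by
  induction l with
  | nil => intro s m; rfl
  | cons x t ih =>
    intro s m
    have hx : x ≠ v := fun h => hv (h ▸ List.mem_cons_self)
    have ht : v ∉ t := fun h => hv (List.mem_cons_of_mem _ h)
    simp only [PySem.List.enumerate_cons, List.foldl_cons]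
    rw [if_neg (by simpa using hx)]
    exact ih ht (s + 1) m

-- inner scan over a list containing v exactly once yields the unique occurrence
theorem inner_found (l : List Int) (v : Int) (r : String) (k : Nat)
    (hk : PySem.List.index? l v = some k) (hc : l.count v ≤ 1) :
    ∀ (s : Int) (m : Option (String × Int)),
      (PySem.List.enumerate l s).foldl
        (fun m p => if p.2 == v then some (r, p.1) else m) m = some (r, s + k) := by
  induction l generalizing k with
  | nil => simp [PySem.List.index?] at hk
  | cons x t ih =>
    intro s m
    by_cases hx : x = v
    · subst hx
      rw [PySem.List.index?_cons_self] at hk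
      obtain rfl : (0 : Nat) = k := Option.some.inj hk
      have hcnt : t.count x = 0 := by
        simp [List.count_cons_self] at hc; omega
      have hvnot : x ∉ t := List.count_eq_zero.mp hcnt
      simp only [PySem.List.enumerate_cons, List.foldl_cons, beq_self_eq_true, if_true]
      rw [inner_noop t x r hvnot]
      simp
    · rw [PySem.List.index?_cons_of_ne t hx] at hk
      cases hk' : PySem.List.index? t v with
      | none => rw [hk'] at hk; simp at hk
      | some k' =>
        rw [hk'] at hk
        obtain rfl : k' + 1 = k := Option.some.inj hk
        have hc' : t.count v ≤ 1 := by
          rw [List.count_cons] at hc; omega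
        simp only [PySem.List.enumerate_cons, List.foldl_cons]
        rw [if_neg (by simpa using hx)]
        rw [ih k' hk' hc' (s + 1) m]
        have : s + 1 + (k' : Int) = s + ((k' + 1 : Nat) : Int) := by push_cast; ring
        rw [this]

-- with a unique occurrence, the last-match scan agrees with B's first-match lookup
theorem lastScan_eq_lookup (sbox : List (String × List Int)) (v : Int)
    (hc : (sbox.flatMap Prod.snd).count v = 1) :
    lastScan sbox v = lookup_alt sbox v := by
  unfold lastScan lookup_alt
  induction sbox with
  | nil => simp at hc
  | cons rv t ih =>
    rw [List.flatMap_cons, List.count_append] at hc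
    by_cases hv : v ∈ rv.2
    · have h1 : rv.2.count v = 1 := by
        have := List.one_le_count_iff.mpr hv
        omega
      have h0 : (t.flatMap Prod.snd).count v = 0 := by omega
      have hnotflat : v ∉ t.flatMap Prod.snd := List.count_eq_zero.mp h0
      have hnot : ∀ rw ∈ t, v ∉ rw.2 := by
        intro rw hrw hmem
        exact hnotflat (List.mem_flatMap.mpr ⟨rw, hrw, hmem⟩)
      obtain ⟨k, hk⟩ := Option.isSome_iff_exists.mp
        ((PySem.List.index?_isSome_iff rv.2 v).mpr hv)
      simp only [List.foldl_cons]
      rw [inner_found rv.2 v rv.1 k hk (by omega) 0 none]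
      have houter :
          ∀ (z : Option (String × Int)) (t' : List (String × List Int)),
            (∀ rw ∈ t', v ∉ rw.2) →
            t'.foldl
              (fun m rw =>
                (PySem.List.enumerate rw.2).foldl
                  (fun m p => if p.2 == v then some (rw.1, p.1) else m) m) z = z := by
        intro z t' hn
        induction t' generalizing z with
        | nil => rfl
        | cons rw t'' ih' =>
          simp only [List.foldl_cons]
          rw [inner_noop rw.2 v rw.1 (hn rw List.mem_cons_self)]
          exact ih' _ (fun x hx => hn x (List.mem_cons_of_mem _ hx))
      rw [houter _ t hnot]
      rw [List.find?_cons_of_pos (by simpa using hv)]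
      rw [PySem.List.index?_eq_idxOf?] at hk
      simp [hk]
    · have hcnt : rv.2.count v = 0 := List.count_eq_zero.mpr hv
      simp only [List.foldl_cons]
      rw [inner_noop rv.2 v rv.1 hv]
      rw [List.find?_cons_of_neg (by simpa using hv)]
      exact ih (by omega)

-- pyRange with step 6 peels its head
theorem pyRange_six_cons (a b : Int) (h : a < b) :
    PySem.List.pyRange a b 6 = a :: PySem.List.pyRange (a + 6) b 6 := by
  rw [PySem.List.pyRange_of_pos a b (by norm_num),
      PySem.List.pyRange_of_pos (a + 6) b (by norm_num)]
  by_cases h2 : a + 6 < b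
  · have hm : ((b - a + 6 - 1) / 6).toNat = ((b - (a + 6) + 6 - 1) / 6).toNat + 1 := by omega
    rw [if_pos h, if_pos h2, hm, List.range_succ_eq_map]
    simp only [List.map_cons, List.map_map]
    refine congrArg₂ _ (by simp) ?_
    apply List.map_congr_left
    intro k _
    simp [Function.comp]
    ring
  · have hm : ((b - a + 6 - 1) / 6).toNat = 1 := by omega
    rw [if_pos h, if_neg h2, hm]
    simp

-- pyRange with step 6 is empty past the stop
theorem pyRange_six_nil (a b : Int) (h : b ≤ a) : PySem.List.pyRange a b 6 = [] := by
  rw [PySem.List.pyRange_of_pos a b (by norm_num)]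
  rw [if_neg (by omega)]
  rfl

-- a value occurring in the S-box is found by B's lookup
theorem lookup_some (sbox : List (String × List Int)) (v : Int)
    (hv : v ∈ sbox.flatMap Prod.snd) : ∃ ri, lookup_alt sbox v = some ri := by
  obtain ⟨rv, hrv, hmem⟩ := List.mem_flatMap.mp hv
  unfold lookup_alt
  have hfind : (sbox.find? (fun rv => rv.2.contains v)).isSome := by
    rw [List.find?_isSome]
    exact ⟨rv, hrv, by simpa using hmem⟩
  obtain ⟨rw, hrw⟩ := Option.isSome_iff_exists.mp hfind
  have hcont : v ∈ rw.2 := by simpa using List.find?_some hrw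
  obtain ⟨k, hk⟩ := Option.isSome_iff_exists.mp
    ((PySem.List.index?_isSome_iff rw.2 v).mpr hcont)
  rw [hrw]
  simp only [Option.bind_some, hk]
  exact ⟨(rw.1, (k : Int)), rfl⟩

-- the A-side chunk at index ↑a is the take/drop chunk of the char list
theorem chunk_eq (bits : String) (a : Nat) :
    PySem.Str.slice bits (some (a : Int)) (some ((a : Int) + 6))
      = String.ofList ((bits.toList.drop a).take 6) := by
  unfold PySem.Str.slice PySem.Chars.slice
  congr 1
  have : ((a : Int) + 6) = ((a : Int) + ((6 : Nat) : Int)) := by norm_num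
  rw [this, PySem.List.slice_natCast_add]

-- the main alignment: A's indexed fold over range(0, len, 6) is B's while loop on the suffix
theorem fold_eq_go (bits : String) (sbox : List (String × List Int))
    (hpre : Pre_compress_bits bits sbox) :
    ∀ (n a : Nat) (ob rs : List String), bits.toList.length - a ≤ n → 6 ∣ a →
    (PySem.List.pyRange (a : Int) (PySem.Str.len bits) 6).foldl
      (fun st i =>
        match st with
        | none => none
        | some (ob, rs) =>
          let chunk := PySem.Str.slice bits (some i) (some (i + 6))
          if PySem.Str.len chunk < 6 then some (ob, rs)
          else
            match PySem.Int.ofStrBase? chunk 2 with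
            | none => none
            | some val =>
              match (build_reverse_sbox sbox).get? val with
              | none => none
              | some ri => some (ob ++ [pyFormat04b ri.2], rs ++ [ri.1]))
      (some (ob, rs))
    = compress_go sbox (bits.toList.drop a) ob rs := by
  have hL : bits.toList.length = bits.length := String.length_toList
  intro n
  induction n with
  | zero =>
    intro a ob rs hn _
    have hge : bits.toList.length ≤ a := by omega
    rw [PySem.Str.len_eq, pyRange_six_nil _ _ (by exact_mod_cast hge)]
    rw [compress_go, dif_neg (by simp only [List.length_drop]; omega)]
    rfl
  | succ n ih =>
    intro a ob rs hn hdvd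
    by_cases hlt : a < bits.toList.length
    case neg =>
      rw [PySem.Str.len_eq, pyRange_six_nil _ _ (by exact_mod_cast (by omega : bits.toList.length ≤ a))]
      rw [compress_go, dif_neg (by simp only [List.length_drop]; omega)]
      rfl
    case pos =>
      rw [PySem.Str.len_eq, pyRange_six_cons _ _ (by exact_mod_cast hlt), List.foldl_cons]
      simp only [chunk_eq bits a]
      by_cases hshort : bits.toList.length - a < 6
      case pos =>
        have hlen : ((bits.toList.drop a).take 6).length < 6 := by
          simp only [List.length_take, List.length_drop]; omega
        rw [if_pos (by
          rw [PySem.Str.len_eq, String.toList_ofList]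
          exact_mod_cast hlen)]
        rw [pyRange_six_nil _ _ (by
          have : bits.toList.length ≤ a + 6 := by omega
          omega)]
        rw [compress_go, dif_neg (by simp only [List.length_drop]; omega)]
        rfl
      case neg =>
        have hlen : ((bits.toList.drop a).take 6).length = 6 := by
          simp only [List.length_take, List.length_drop]; omega
        rw [if_neg (by
          rw [PySem.Str.len_eq, String.toList_ofList, hlen]
          omega)]
        have hmem : (a : Int) ∈ PySem.List.pyRange 0 (PySem.Str.len bits) 6 := by
          rw [PySem.Str.len_eq]
          rw [PySem.List.mem_pyRange_iff_of_pos (by norm_num)]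
          refine ⟨by positivity, by exact_mod_cast hlt, ?_⟩
          simpa using Int.natCast_dvd_natCast.mpr hdvd
        have hp := hpre (a : Int) hmem
        simp only [chunk_eq bits a] at hp
        have hp' := hp (by
          rw [PySem.Str.len_eq, String.toList_ofList, hlen]
          omega)
        cases hval : PySem.Int.ofStrBase? (String.ofList ((bits.toList.drop a).take 6)) 2 with
        | none => rw [hval] at hp'; simp at hp'
        | some val =>
          rw [hval] at hp'
          simp only [Option.any_some, beq_iff_eq] at hp'
          have hcnt : (sbox.flatMap Prod.snd).count val = 1 := by simpa using hp'
          have hget : (build_reverse_sbox sbox).get? val = lookup_alt sbox val := by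
            rw [get?_build_reverse, lastScan_eq_lookup sbox val hcnt]
          obtain ⟨ri, hri⟩ := lookup_some sbox val (by
            rw [← List.count_pos_iff]; omega)
          simp only [hget, hri]
          rw [compress_go, dif_pos (by simp only [List.length_drop]; omega)]
          rw [show PySem.Int.ofCharsBase? ((bits.toList.drop a).take 6) 2
                = PySem.Int.ofStrBase? (String.ofList ((bits.toList.drop a).take 6)) 2 from
              (PySem.Int.ofStrBase?_ofList _ 2).symm]
          simp only [hval, hri]
          have hdrop : (bits.toList.drop a).drop 6 = bits.toList.drop (a + 6) := by
            rw [List.drop_drop]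
          rw [hdrop]
          have hcast : (a : Int) + 6 = ((a + 6 : Nat) : Int) := by push_cast; ring
          rw [hcast, ← PySem.Str.len_eq]
          exact ih (a + 6) _ _ (by omega) (by omega)

-- ===== VERDICT (by name: the statement is the Claim_ definition above) =====
theorem compress_bits_spec : Claim_equal_compress_bits := by
  intro bits sbox _ hpre
  unfold Spec_compress_bits compress_bits compress_bits_alt
  have h := fold_eq_go bits sbox hpre bits.toList.length 0 [] [] (by omega) (by omega)
  simp only [Nat.cast_zero, List.drop_zero] at h
  simp only [h]
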